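-- pv_equiv track=rewrite | github.com/hamidriaz1998/emailVariationGenerator | email_generator.py | generate_dot_variations
-- ===== SOURCE A (Python) =====
-- def generate_dot_variations(username):
--     """Generate all possible dot variations for the username."""
--     if not username:
--         return []
--
--     # Get all possible positions for dots (between characters)
--     positions = len(username) - 1
--     variations = set()
--
--     # Generate all combinations of dot placements
--     for i in range(2**positions):
--         variation = list(username)
--         offset = 0
--         for pos in range(positions):
--             if (i >> pos) & 1:
--                 variation.insert(pos + 1 + offset, ".")
--                 offset += 1
--         variation = "".join(variation)
--         # Only add valid variations (no consecutive dots, no leading/trailing dots)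
--         if ".." not in variation and variation[0] != "." and variation[-1] != ".":
--             variations.add(variation)
--
--     return variations
-- ===== SOURCE B (Python) =====
-- def generate_dot_variations(username):
--     """Generate all possible dot variations for the username."""
--     if not username:
--         return []
--
--     # Recursive decomposition: each of the len-1 gaps independently gets a dot or not.
--     def rec(s):
--         if len(s) == 1:
--             return [s]
--         out = []
--         for v in rec(s[1:]):
--             out.append(s[0] + v)
--             out.append(s[0] + "." + v)
--         return out
--
--     variations = set()
--     for w in rec(username):
--         if ".." not in w and w[0] != "." and w[-1] != ".":
--             variations.add(w)
--     return variations
-- ===== Notes on version B (the rewrite author's own statement) =====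
-- stated objective: simpler
-- what changed: Replaces A's bitmask enumeration (2^(n-1) masks, each decoded by an insert-with-offset splice loop over all gap positions) with a structural recursion on the string that, for each variation of the tail, emits the head joined to it both with and without a separating dot, building each candidate front to back in one pass.
import Mathlib
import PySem

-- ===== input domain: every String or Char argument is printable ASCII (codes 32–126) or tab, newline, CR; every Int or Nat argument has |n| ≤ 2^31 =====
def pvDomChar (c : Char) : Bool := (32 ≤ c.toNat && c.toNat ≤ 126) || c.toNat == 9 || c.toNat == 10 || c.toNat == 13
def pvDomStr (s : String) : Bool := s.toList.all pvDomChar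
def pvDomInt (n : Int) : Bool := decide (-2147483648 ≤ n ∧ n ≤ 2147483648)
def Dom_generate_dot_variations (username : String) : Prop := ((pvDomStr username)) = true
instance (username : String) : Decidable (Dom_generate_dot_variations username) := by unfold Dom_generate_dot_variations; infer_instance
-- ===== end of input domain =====

-- B replaces A's 2^(n-1) bitmask loop with insert-and-offset splicing by a structural
-- recursion on the string that builds each variation front to back (objective: simpler).

-- ===== PORT A =====
def generate_dot_variations (username : String) : List String :=
  if PySem.Str.len username = 0 then []
  else
    let positions : Nat := username.toList.length - 1
    (PySem.List.pyRange 0 ((2:Int)^positions) 1).foldl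
      (fun (variations : PySem.Set String) i =>
        let st := (PySem.List.pyRange 0 (positions : Int) 1).foldl
          (fun (st : List Char × Int) pos =>
            if PySem.Int.band (i >>> pos.toNat) 1 == 1 then
              (PySem.List.insert st.1 (pos + 1 + st.2) '.', st.2 + 1)
            else st) (username.toList, 0)
        let w := String.ofList st.1
        if PySem.Str.isIn ".." w = false ∧ PySem.Str.pyGet? w 0 ≠ some '.' ∧
            PySem.Str.pyGet? w (-1) ≠ some '.' then
          PySem.Set.add variations w
        else variations)
      PySem.Set.empty

-- ===== PORT B =====
-- rec(s): a single char maps to itself; else each tail variation is prefixed by the head, with and without a separating dot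
def gdvRec : List Char → List (List Char)
  | [] => []
  | [c] => [[c]]
  | c :: d :: r =>
      (gdvRec (d :: r)).foldl (fun out v => out ++ [c :: v, c :: '.' :: v]) []

def generate_dot_variations_alt (username : String) : List String :=
  if PySem.Str.len username = 0 then []
  else
    (gdvRec username.toList).foldl
      (fun (variations : PySem.Set String) v =>
        let w := String.ofList v
        if PySem.Str.isIn ".." w = false ∧ PySem.Str.pyGet? w 0 ≠ some '.' ∧
            PySem.Str.pyGet? w (-1) ≠ some '.' then
          PySem.Set.add variations w
        else variations)
      PySem.Set.empty

-- ===== PRECONDITION & SPEC =====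
def Spec_generate_dot_variations (username : String) (out : List String) : Prop := out = generate_dot_variations_alt username
instance (username : String) (out : List String) : Decidable (Spec_generate_dot_variations username out) := by unfold Spec_generate_dot_variations; infer_instance

-- ===== CLAIM (what is proved, stated in full; the proofs are below) =====
def Claim_equal_generate_dot_variations : Prop := ∀ (username : String), Dom_generate_dot_variations username → Spec_generate_dot_variations username (generate_dot_variations username)

-- ===== LEMMAS AND PROOFS =====

-- bit pos of mask i, exactly as A tests it
def gdvBit (i : Int) (j : Nat) : Bool := PySem.Int.band (i >>> j) 1 == 1

-- rest with a dot inserted before the char at gap j whenever g j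
def weaveT (g : Nat → Bool) : List Char → List Char
  | [] => []
  | c :: r => (if g 0 then ['.'] else []) ++ c :: weaveT (fun j => g (j+1)) r

-- A's inner insert loop body, named for the lemmas (definitional match with port A)
def gdvStep (i : Int) (st : List Char × Int) (pos : Int) : List Char × Int :=
  if PySem.Int.band (i >>> pos.toNat) 1 == 1 then
    (PySem.List.insert st.1 (pos + 1 + st.2) '.', st.2 + 1)
  else st

-- the shared filter-and-add loop body, named for the lemmas
def gdvFilt (variations : PySem.Set String) (v : List Char) : PySem.Set String :=
  let w := String.ofList v
  if PySem.Str.isIn ".." w = false ∧ PySem.Str.pyGet? w 0 ≠ some '.' ∧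
      PySem.Str.pyGet? w (-1) ≠ some '.' then
    PySem.Set.add variations w
  else variations

theorem weaveT_congr {g g' : Nat → Bool} (h : ∀ j, g j = g' j) :
    ∀ r : List Char, weaveT g r = weaveT g' r := by
  intro r
  induction r generalizing g g' with
  | nil => rfl
  | cons c r ih => rw [weaveT, weaveT, h 0, ih (fun j => h (j+1))]

theorem shiftRight_succ_shift (i : Int) (j : Nat) : i >>> (j+1) = (i >>> (1:Nat)) >>> j := by
  simp only [Int.shiftRight_eq_div_pow]
  push_cast
  rw [pow_succ, mul_comm, ← Int.ediv_ediv_of_nonneg (by norm_num : (0:Int) ≤ 2)]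

theorem double_shift (b i : Int) (hb : 0 ≤ b) (hb2 : b < 2) : (2*i+b) >>> (1:Nat) = i := by
  simp [Int.shiftRight_eq_div_pow]; omega

theorem gdvBit_double (b i : Int) (hb : 0 ≤ b) (hb2 : b < 2) (j : Nat) :
    gdvBit (2*i+b) (j+1) = gdvBit i j := by
  unfold gdvBit
  rw [shiftRight_succ_shift, double_shift b i hb hb2]

theorem gdvBit_zero_even (i : Int) : gdvBit (2*i) 0 = false := by
  unfold gdvBit
  simp [PySem.Int.band_one]

theorem gdvBit_zero_odd (i : Int) : gdvBit (2*i+1) 0 = true := by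
  unfold gdvBit
  simp [PySem.Int.band_one]

-- A's inner insert loop weaves dots into rest after the already-built prefix `done`
theorem inner_spec (i : Int) : ∀ (rest done : List Char) (off : Int) (k : Nat),
    0 ≤ off → (done.length : Int) = (k : Int) + 1 + off →
    ∃ off', (PySem.List.pyRange (k : Int) ((k : Int) + rest.length) 1).foldl
        (gdvStep i) (done ++ rest, off)
      = (done ++ weaveT (fun j => gdvBit i (k + j)) rest, off') ∧ 0 ≤ off' := by
  intro rest
  induction rest with
  | nil =>
      intro done off k hoff hlen
      exact ⟨off, by simp [PySem.List.pyRange_one_eq_nil, weaveT], hoff⟩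
  | cons c r ih =>
      intro done off k hoff hlen
      rw [PySem.List.pyRange_one_cons (a := (k:Int)) (b := (k:Int) + ((c::r).length:Int))
        (by simp only [List.length_cons]; push_cast; omega), List.foldl_cons]
      by_cases hb : gdvBit i k
      · have hstep : gdvStep i (done ++ c :: r, off) ((k:Int)) = (done ++ '.' :: c :: r, off + 1) := by
          unfold gdvStep
          have h1 : ((k:Int)).toNat = k := Int.toNat_natCast k
          rw [h1]
          have h2 : gdvBit i k = true := hb
          unfold gdvBit at h2
          rw [if_pos h2]
          have h3 : (k:Int) + 1 + off = (done.length : Int) := by omega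
          simp only [h3]
          rw [PySem.List.insert_natCast _ done.length _ (by simp)]
          simp
        rw [hstep]
        have hre : done ++ '.' :: c :: r = (done ++ ['.', c]) ++ r := by simp
        rw [hre]
        have hlen2 : (((done ++ ['.', c]).length : Int)) = ((k+1 : Nat) : Int) + 1 + (off + 1) := by
          simp; omega
        have hrange : (k:Int) + 1 = ((k+1 : Nat) : Int) := by push_cast; ring
        have hub : (k:Int) + ((c :: r).length : Int) = ((k+1:Nat):Int) + (r.length : Int) := by
          simp; ring
        rw [hub, hrange]
        obtain ⟨off', heq, hoff'⟩ := ih (done ++ ['.', c]) (off+1) (k+1) (by omega) hlen2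
        refine ⟨off', ?_, hoff'⟩
        rw [heq]
        congr 1
        rw [weaveT]
        simp only [Nat.add_zero]
        rw [if_pos hb]
        simp only [List.append_assoc, List.cons_append, List.nil_append]
        congr 2
        exact congrArg (c :: ·) (weaveT_congr (g := fun j => gdvBit i (k+1+j))
          (g' := fun j => gdvBit i (k+(j+1)))
          (fun j => by show gdvBit i (k+1+j) = gdvBit i (k+(j+1)); congr 1; omega) r)
      · have hstep : gdvStep i (done ++ c :: r, off) ((k:Int)) = (done ++ c :: r, off) := by
          unfold gdvStep
          have h1 : ((k:Int)).toNat = k := Int.toNat_natCast k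
          rw [h1]
          have h2 : gdvBit i k = false := by simpa using hb
          unfold gdvBit at h2
          rw [if_neg (by simp [h2])]
        rw [hstep]
        have hre : done ++ c :: r = (done ++ [c]) ++ r := by simp
        rw [hre]
        have hlen2 : (((done ++ [c]).length : Int)) = ((k+1 : Nat) : Int) + 1 + off := by
          simp; omega
        have hrange : (k:Int) + 1 = ((k+1 : Nat) : Int) := by push_cast; ring
        have hub : (k:Int) + ((c :: r).length : Int) = ((k+1:Nat):Int) + (r.length : Int) := by
          simp; ring
        rw [hub, hrange]
        obtain ⟨off', heq, hoff'⟩ := ih (done ++ [c]) off (k+1) hoff hlen2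
        refine ⟨off', ?_, hoff'⟩
        rw [heq]
        congr 1
        rw [weaveT]
        simp only [Nat.add_zero]
        rw [if_neg hb]
        simp only [List.append_assoc, List.cons_append, List.nil_append]
        congr 1
        exact congrArg (c :: ·) (weaveT_congr (g := fun j => gdvBit i (k+1+j))
          (g' := fun j => gdvBit i (k+(j+1)))
          (fun j => by show gdvBit i (k+1+j) = gdvBit i (k+(j+1)); congr 1; omega) r)

-- range(2m) lists each i' of range(m) as the pair 2i', 2i'+1
theorem range_pairs (m : Nat) :
    PySem.List.pyRange 0 ((2*m : Nat) : Int) 1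
      = (PySem.List.pyRange 0 (m : Int) 1).flatMap (fun i' => [2*i', 2*i'+1]) := by
  induction m with
  | zero => simp [PySem.List.pyRange_one_eq_nil]
  | succ n ih =>
      have h1 : ((2*(n+1) : Nat) : Int) = ((2*n : Nat) : Int) + 1 + 1 := by push_cast; ring
      rw [h1]
      rw [PySem.List.pyRange_one_succ_right (by positivity)]
      rw [PySem.List.pyRange_one_succ_right (by positivity)]
      have h2 : ((n+1 : Nat) : Int) = (n : Int) + 1 := by push_cast; ring
      rw [h2, PySem.List.pyRange_one_succ_right (by positivity)]
      rw [List.flatMap_append, ih]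
      simp

-- the two ports build the same candidate list, in the same order
theorem main_map (t : List Char) : ∀ c : Char,
    (PySem.List.pyRange 0 ((2:Int)^t.length) 1).map (fun i => c :: weaveT (gdvBit i) t)
      = gdvRec (c :: t) := by
  induction t with
  | nil =>
      intro c
      rw [show ((2:Int)^(List.length ([] : List Char))) = 0 + 1 by simp]
      rw [PySem.List.pyRange_one_singleton]
      rfl
  | cons d r ih =>
      intro c
      have hpow : ((2:Int)^(d::r).length) = ((2*(2^r.length) : Nat) : Int) := by
        push_cast; rw [List.length_cons]; ring
      rw [hpow, range_pairs]
      have hpow2 : ((2^r.length : Nat) : Int) = (2:Int)^r.length := by push_cast; ring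
      rw [List.map_flatMap]
      rw [gdvRec]
      rw [PySem.List.foldl_append_eq_flatMap (acc := []) (l := gdvRec (d::r))
        (g := fun v => [c :: v, c :: '.' :: v])]
      rw [List.nil_append, ← ih d, List.flatMap_map, ← hpow2]
      apply List.flatMap_congr
      intro i' hmem
      have hi' : 0 ≤ i' := by
        have := (PySem.List.mem_pyRange_one.mp hmem).1
        omega
      simp only [List.map_cons, List.map_nil]
      have hw0 : weaveT (gdvBit (2*i')) (d :: r) = d :: weaveT (gdvBit i') r := by
        rw [weaveT, gdvBit_zero_even, if_neg (by simp)]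
        rw [List.nil_append]
        refine congrArg (d :: ·) (weaveT_congr (fun j => ?_) r)
        show gdvBit (2*i') (j+1) = gdvBit i' j
        rw [show 2*i' = 2*i'+0 by ring]
        exact gdvBit_double 0 i' le_rfl (by norm_num) j
      have hw1 : weaveT (gdvBit (2*i'+1)) (d :: r) = '.' :: d :: weaveT (gdvBit i') r := by
        rw [weaveT, gdvBit_zero_odd, if_pos rfl]
        exact congrArg (fun l => '.' :: d :: l)
          (weaveT_congr (fun j => gdvBit_double 1 i' (by omega) (by omega) j) r)
      rw [hw0, hw1]

-- A's inner loop on the whole word, stated for position count = t.length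
theorem build_spec (t : List Char) (c : Char) (i : Int) :
    ((PySem.List.pyRange 0 ((t.length:Nat):Int) 1).foldl (gdvStep i) (c::t, 0)).1
      = c :: weaveT (gdvBit i) t := by
  obtain ⟨off', heq, _⟩ := inner_spec i t [c] 0 0 le_rfl (by simp)
  have h0 : ((0:Nat):Int) = 0 := rfl
  rw [h0] at heq
  rw [show (0:Int) + (t.length:Int) = (t.length:Int) by ring] at heq
  rw [List.singleton_append] at heq
  rw [heq]
  exact congrArg (c :: ·) (weaveT_congr (fun j => by rw [Nat.zero_add]) t)

-- ===== VERDICT (by name: the statement is the Claim_ definition above) =====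
theorem generate_dot_variations_spec : Claim_equal_generate_dot_variations := by
  intro u _
  unfold Spec_generate_dot_variations generate_dot_variations generate_dot_variations_alt
  by_cases h : PySem.Str.len u = 0
  · rw [if_pos h, if_pos h]
  · rw [if_neg h, if_neg h]
    obtain ⟨c, t, hct⟩ : ∃ c t, u.toList = c :: t := by
      cases hl : u.toList with
      | nil => exact absurd (by rw [PySem.Str.len_eq, hl]; rfl) h
      | cons c t => exact ⟨c, t, rfl⟩
    rw [hct]
    simp only [List.length_cons, Nat.add_sub_cancel]
    have step1 : (PySem.List.pyRange 0 ((2:Int)^t.length) 1).foldl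
        (fun (variations : PySem.Set String) i =>
          let st := (PySem.List.pyRange 0 ((t.length:Nat) : Int) 1).foldl
            (fun (st : List Char × Int) pos =>
              if PySem.Int.band (i >>> pos.toNat) 1 == 1 then
                (PySem.List.insert st.1 (pos + 1 + st.2) '.', st.2 + 1)
              else st) (c::t, 0)
          let w := String.ofList st.1
          if PySem.Str.isIn ".." w = false ∧ PySem.Str.pyGet? w 0 ≠ some '.' ∧
              PySem.Str.pyGet? w (-1) ≠ some '.' then
            PySem.Set.add variations w
          else variations) PySem.Set.empty
        = ((PySem.List.pyRange 0 ((2:Int)^t.length) 1).map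
            (fun i => c :: weaveT (gdvBit i) t)).foldl gdvFilt PySem.Set.empty := by
      rw [List.foldl_map]
      apply PySem.List.foldl_congr_mem
      intro acc i _
      show gdvFilt acc (((PySem.List.pyRange 0 ((t.length:Nat):Int) 1).foldl (gdvStep i) (c::t, 0)).1)
            = gdvFilt acc (c :: weaveT (gdvBit i) t)
      rw [build_spec t c i]
    rw [step1, main_map t c]
    rfl
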